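-- pv_equiv track=rewrite | github.com/arcofdescent/code_snippets | python/num_descending.py | get_max_num_descending
-- ===== SOURCE A (Python) =====
-- def get_max_num_descending(arr):
--     curr_idx = 0
--     num_descending = [ 0 ]
--
--     for idx, val in enumerate(arr):
--
--         # last element
--         if (idx == len(arr) - 1):
--             num_descending.sort()
--             return num_descending.pop()
--
--         if (arr[idx+1] < arr[idx]):
--             num_descending[curr_idx] = num_descending[curr_idx] + 1
--         else:
--             curr_idx = curr_idx + 1
--             num_descending.append(0)
-- ===== SOURCE B (Python) =====
-- def get_max_num_descending(arr):
--     # Single pass: running max of lengths of strictly-descending runs.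
--     if not arr:
--         return None
--     best = 0
--     cur = 0
--     for i in range(1, len(arr)):
--         if arr[i] < arr[i - 1]:
--             cur += 1
--             best = max(best, cur)
--         else:
--             cur = 0
--     return best
-- ===== Notes on version B (the rewrite author's own statement) =====
-- stated objective: simpler
-- what changed: A keeps a list of per-run descent counts and finally sorts it and pops the last element; B keeps only a running count and a running maximum in one pass, no list and no sort.
-- outside the precondition, e.g. on get_max_num_descending([]): A returns None, B returns None
import Mathlib
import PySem

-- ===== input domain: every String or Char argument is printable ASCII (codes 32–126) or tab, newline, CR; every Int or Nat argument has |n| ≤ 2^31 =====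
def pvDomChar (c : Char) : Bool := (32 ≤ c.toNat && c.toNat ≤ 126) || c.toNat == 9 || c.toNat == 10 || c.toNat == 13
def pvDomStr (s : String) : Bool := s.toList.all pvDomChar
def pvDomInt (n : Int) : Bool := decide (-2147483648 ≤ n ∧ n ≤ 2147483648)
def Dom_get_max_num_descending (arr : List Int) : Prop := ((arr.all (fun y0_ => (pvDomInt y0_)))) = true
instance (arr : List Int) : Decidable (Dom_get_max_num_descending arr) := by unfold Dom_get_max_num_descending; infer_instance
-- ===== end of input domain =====

-- B replaces A's list of per-run descent counts (finished with sort+pop) by a single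
-- pass holding one running count and one running maximum (objective: simpler).

-- ===== PORT A =====
-- the enumerate loop of A, one fuel tick per iteration (fuel = remaining iterations,
-- a totality guard only): at idx = len-1 it sorts num_descending and returns its pop();
-- otherwise it updates num_descending and moves on.  Fuel running out = falling out of
-- the loop, Python's `return None` (only for arr = [], excluded by Pre_); the port returns 0 there.
def aGo (arr : List Int) : Nat → Nat → Nat → List Int → Int
  | 0, _, _, _ => 0
  | fuel+1, idx, curr, nd =>
    if idx = arr.length - 1 then
      match PySem.List.pop? (PySem.List.sorted nd (fun x => x) false) (-1) with
      | some p => p.1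
      | none => 0   -- unreachable: num_descending is never empty
    else
      if arr.getD (idx+1) 0 < arr.getD idx 0 then
        aGo arr fuel (idx+1) curr (nd.set curr (nd.getD curr 0 + 1))
      else
        aGo arr fuel (idx+1) (curr+1) (nd ++ [0])

def get_max_num_descending (arr : List Int) : Int :=
  aGo arr arr.length 0 0 [0]

-- ===== PORT B =====
-- B's loop over i in range(1, len(arr)) with running (cur, best); fuel = remaining
-- iterations (= len - i), a totality guard only
def bGo (arr : List Int) : Nat → Nat → Int → Int → Int
  | 0, _, _, best => best
  | fuel+1, i, cur, best =>
    if arr.getD i 0 < arr.getD (i-1) 0 then bGo arr fuel (i+1) (cur+1) (max best (cur+1))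
    else bGo arr fuel (i+1) 0 best

def get_max_num_descending_alt (arr : List Int) : Int :=
  if arr.isEmpty then 0   -- Source B returns None here; outside Pre_
  else bGo arr (arr.length - 1) 1 0 0

-- ===== PRECONDITION & SPEC =====
-- On arr = [] the Python A falls out of its loop and returns None, which is not an int;
-- Pre_ excludes exactly the empty list.
def Pre_get_max_num_descending (arr : List Int) : Prop := arr ≠ []
instance (arr : List Int) : Decidable (Pre_get_max_num_descending arr) := by
  unfold Pre_get_max_num_descending; infer_instance

def pvWitness_get_max_num_descending : List Int := [3, 2, 5, 1, 0]

def Spec_get_max_num_descending (arr : List Int) (out : Int) : Prop := out = get_max_num_descending_alt arr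
instance (arr : List Int) (out : Int) : Decidable (Spec_get_max_num_descending arr out) := by
  unfold Spec_get_max_num_descending; infer_instance

-- ===== CLAIM (what is proved, stated in full; the proofs are below) =====
def Claim_equal_get_max_num_descending : Prop := ∀ (arr : List Int), Dom_get_max_num_descending arr → Pre_get_max_num_descending arr → Spec_get_max_num_descending arr (get_max_num_descending arr)

-- ===== LEMMAS AND PROOFS =====

-- in a ≤-sorted list every element is at most the last one
lemma le_last_of_pairwise (zs : List Int) (z : Int) (hp : (zs ++ [z]).Pairwise (· ≤ ·)) :
    ∀ x ∈ zs ++ [z], x ≤ z := by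
  intro x hx
  rcases List.mem_append.1 hx with hxz | hxz
  · exact (List.pairwise_append.1 hp).2.2 x hxz z (by simp)
  · simp at hxz; omega

-- sorted-then-pop-last computes the running max (nonempty list of nonnegatives)
lemma sorted_pop_eq_foldl_max (nd : List Int) (hne : nd ≠ []) (hpos : ∀ x ∈ nd, (0:Int) ≤ x) :
    (match PySem.List.pop? (PySem.List.sorted nd (fun x => x) false) (-1) with
      | some p => p.1
      | none => 0) = nd.foldl max 0 := by
  have hsne : PySem.List.sorted nd (fun x => x) false ≠ [] := by
    intro h; exact hne ((PySem.List.sorted_eq_nil_iff nd (fun x => x) false).1 h)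
  obtain ⟨zs, z, hsz⟩ := List.eq_nil_or_concat' (PySem.List.sorted nd (fun x => x) false) |>.resolve_left hsne
  rw [hsz, PySem.List.pop?_last]
  dsimp only
  have hperm : (zs ++ [z]).Perm nd := hsz ▸ PySem.List.sorted_perm ..
  have hpair : (zs ++ [z]).Pairwise (· ≤ ·) := by
    have := PySem.List.sorted_pairwise (xs := nd) (key := fun x => x)
    rw [hsz] at this; simpa using this
  have hub : ∀ x ∈ nd, x ≤ z := fun x hx =>
    le_last_of_pairwise zs z hpair x ((hperm.mem_iff).2 hx)
  have hzmem : z ∈ nd := (hperm.mem_iff).1 (by simp)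
  have hfold := PySem.List.le_foldl_max nd 0
  have h1 : z ≤ nd.foldl max 0 := hfold.2 _ hzmem
  have h2 : nd.foldl max 0 ≤ z := by
    rcases PySem.List.foldl_max_mem nd 0 with h | h
    · rw [h]; exact hpos z hzmem
    · exact hub _ h
  omega

lemma foldl_max_concat (ys : List Int) (c : Int) :
    (ys ++ [c]).foldl max 0 = max (ys.foldl max 0) c := by
  simp [List.foldl_append]

lemma foldl_max_nonneg (ys : List Int) : (0:Int) ≤ ys.foldl max 0 :=
  (PySem.List.le_foldl_max ys 0).1

-- main loop invariant: A's loop with nd = ys ++ [c] agrees with B's loop carrying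
-- cur = c and best = max of nd
lemma key_lemma (arr : List Int) : ∀ fuel idx ys (c : Int), fuel + idx = arr.length →
    idx < arr.length → (∀ x ∈ ys, (0:Int) ≤ x) → 0 ≤ c →
    aGo arr fuel idx ys.length (ys ++ [c]) = bGo arr (fuel - 1) (idx+1) c ((ys ++ [c]).foldl max 0) := by
  intro fuel
  induction fuel with
  | zero => intro idx ys c hk hlt _ _; omega
  | succ fuel ih =>
    intro idx ys c hk hlt hys hc
    have hposnd : ∀ x ∈ ys ++ [c], (0:Int) ≤ x := by
      intro x hx; rcases List.mem_append.1 hx with h | h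
      · exact hys x h
      · simp at h; omega
    by_cases hlast : idx = arr.length - 1
    · have hfuel0 : fuel = 0 := by omega
      subst hfuel0
      rw [aGo, if_pos hlast,
        sorted_pop_eq_foldl_max (ys ++ [c]) (by simp) hposnd]
      rfl
    · have hlt2 : idx + 1 < arr.length := by omega
      have hfuelpos : 1 ≤ fuel := by omega
      rw [aGo, if_neg hlast]
      rw [show fuel + 1 - 1 = (fuel - 1) + 1 by omega, bGo]
      simp only [Nat.add_sub_cancel]
      by_cases hdesc : arr.getD (idx+1) 0 < arr.getD idx 0
      · rw [if_pos hdesc, if_pos hdesc]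
        have hset : (ys ++ [c]).set ys.length ((ys ++ [c]).getD ys.length 0 + 1)
            = ys ++ [c + 1] := by
          rw [List.getD_eq_getElem?_getD]
          simp
        rw [hset, ih (idx+1) ys (c+1) (by omega) hlt2 hys (by omega)]
        congr 1
        rw [foldl_max_concat, foldl_max_concat]
        omega
      · rw [if_neg hdesc, if_neg hdesc]
        have ih' := ih (idx+1) (ys ++ [c]) 0 (by omega) hlt2 hposnd le_rfl
        rw [show (ys ++ [c]).length = ys.length + 1 by simp] at ih'
        rw [show ys ++ [c] ++ [0] = (ys ++ [c]) ++ [0] from rfl, ih']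
        congr 1
        rw [foldl_max_concat]
        exact max_eq_left (foldl_max_nonneg _)

-- ===== VERDICT (by name: the statement is the Claim_ definition above) =====
theorem get_max_num_descending_spec : Claim_equal_get_max_num_descending := by
  intro arr _hdom hpre
  unfold Spec_get_max_num_descending get_max_num_descending get_max_num_descending_alt
  have hne : arr ≠ [] := hpre
  have hlen : 0 < arr.length := List.length_pos_iff.2 hne
  have h := key_lemma arr (arr.length) 0 [] 0 (by omega) hlen (by simp) le_rfl
  simp only [List.length_nil, List.nil_append] at h
  rw [h]
  simp [hne]
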